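-- pv_equiv track=rewrite | github.com/anungis437/nzila_eexports | commissions/geo_utils.py | validate_broker_location
-- ===== SOURCE A (Python) =====
-- def validate_broker_location(claimed_country: str, detected_country: str) -> bool:
--     """
--     Validate if claimed location matches detected location
--     (Allows for VPN/proxy tolerance)
--
--     Args:
--         claimed_country: Country code broker claimed
--         detected_country: Country code detected from IP
--
--     Returns:
--         bool: True if locations match or are in same region
--     """
--     # Same country = valid
--     if claimed_country == detected_country:
--         return True
--
--     # Regional groupings (allow movement within region)
--     WEST_AFRICA = ['CI', 'SN', 'GH', 'NG', 'BJ', 'TG', 'BF', 'ML']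
--     CENTRAL_AFRICA = ['CM', 'CD']
--     EAST_AFRICA = ['KE', 'TZ', 'UG']
--     NORTH_AFRICA = ['MA', 'TN', 'EG', 'DZ']
--     SOUTHERN_AFRICA = ['ZA', 'NA', 'BW']
--
--     regions = [WEST_AFRICA, CENTRAL_AFRICA, EAST_AFRICA, NORTH_AFRICA, SOUTHERN_AFRICA]
--
--     for region in regions:
--         if claimed_country in region and detected_country in region:
--             return True
--
--     return False
-- ===== SOURCE B (Python) =====
-- _REGION_OF = {}
-- for _region, _codes in [
--     ("WA", ['CI', 'SN', 'GH', 'NG', 'BJ', 'TG', 'BF', 'ML']),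
--     ("CA", ['CM', 'CD']),
--     ("EA", ['KE', 'TZ', 'UG']),
--     ("NA", ['MA', 'TN', 'EG', 'DZ']),
--     ("SA", ['ZA', 'NA', 'BW']),
-- ]:
--     for _c in _codes:
--         _REGION_OF[_c] = _region
--
--
-- def validate_broker_location(claimed_country: str, detected_country: str) -> bool:
--     if claimed_country == detected_country:
--         return True
--     region = _REGION_OF.get(claimed_country)
--     return region is not None and region == _REGION_OF.get(detected_country)
-- ===== Notes on version B (the rewrite author's own statement) =====
-- stated objective: idiomatic
-- what changed: Replaced the loop over region lists with two O(1) lookups in a country-to-region dict built once at module load; unknown codes map to None so two distinct unmapped countries still return False.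
import Mathlib
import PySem

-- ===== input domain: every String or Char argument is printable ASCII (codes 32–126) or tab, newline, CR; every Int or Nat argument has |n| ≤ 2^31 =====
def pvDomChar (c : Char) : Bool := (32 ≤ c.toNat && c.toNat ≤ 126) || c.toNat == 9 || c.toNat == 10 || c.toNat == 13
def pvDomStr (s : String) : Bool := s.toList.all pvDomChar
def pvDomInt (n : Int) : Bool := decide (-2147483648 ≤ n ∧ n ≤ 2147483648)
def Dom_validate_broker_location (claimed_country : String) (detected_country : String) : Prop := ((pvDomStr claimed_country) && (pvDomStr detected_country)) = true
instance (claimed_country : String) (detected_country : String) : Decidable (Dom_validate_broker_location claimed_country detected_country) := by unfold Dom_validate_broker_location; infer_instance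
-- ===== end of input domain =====

-- B replaces A's scan over region lists with two lookups in a country→region dict built once (idiomatic; same result).

-- ===== PORT A =====
def pvRegionsA : List (List String) :=
  [["CI", "SN", "GH", "NG", "BJ", "TG", "BF", "ML"],
   ["CM", "CD"],
   ["KE", "TZ", "UG"],
   ["MA", "TN", "EG", "DZ"],
   ["ZA", "NA", "BW"]]

-- the 'for region in regions' loop with its early return
def pvLoopA (regions : List (List String)) (c d : String) : Bool :=
  match regions with
  | [] => false
  | r :: rs => if r.contains c && r.contains d then true else pvLoopA rs c d

def validate_broker_location (claimed_country : String) (detected_country : String) : Bool :=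
  if claimed_country == detected_country then true
  else pvLoopA pvRegionsA claimed_country detected_country

-- ===== PORT B =====
-- the module-level dict _REGION_OF (built once in Source B), as the assoc list it ends up as
def pvRegionOf : PySem.Dict String String :=
  PySem.Dict.mk
  [("CI", "WA"), ("SN", "WA"), ("GH", "WA"), ("NG", "WA"),
   ("BJ", "WA"), ("TG", "WA"), ("BF", "WA"), ("ML", "WA"),
   ("CM", "CA"), ("CD", "CA"),
   ("KE", "EA"), ("TZ", "EA"), ("UG", "EA"),
   ("MA", "NA"), ("TN", "NA"), ("EG", "NA"), ("DZ", "NA"),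
   ("ZA", "SA"), ("NA", "SA"), ("BW", "SA")]

def validate_broker_location_alt (claimed_country : String) (detected_country : String) : Bool :=
  if claimed_country == detected_country then true
  else
    match PySem.Dict.get? pvRegionOf claimed_country with
    | none => false            -- region is None
    | some r => PySem.Dict.get? pvRegionOf detected_country == some r

-- ===== PRECONDITION & SPEC =====
def Spec_validate_broker_location (claimed_country : String) (detected_country : String) (out : Bool) : Prop := out = validate_broker_location_alt claimed_country detected_country
instance (claimed_country : String) (detected_country : String) (out : Bool) : Decidable (Spec_validate_broker_location claimed_country detected_country out) := by unfold Spec_validate_broker_location; infer_instance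

-- ===== CLAIM (what is proved, stated in full; the proofs are below) =====
def Claim_equal_validate_broker_location : Prop := ∀ (claimed_country : String) (detected_country : String), Dom_validate_broker_location claimed_country detected_country → Spec_validate_broker_location claimed_country detected_country (validate_broker_location claimed_country detected_country)

-- ===== LEMMAS AND PROOFS =====

def pvAllCodes : List String :=
  ["CI", "SN", "GH", "NG", "BJ", "TG", "BF", "ML", "CM", "CD",
   "KE", "TZ", "UG", "MA", "TN", "EG", "DZ", "ZA", "NA", "BW"]

-- a code outside the 20 known ones belongs to no region list and has no region
theorem pv_unknown (c : String) (hc : c ∉ pvAllCodes) :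
    (∀ r ∈ pvRegionsA, r.contains c = false) ∧ PySem.Dict.get? pvRegionOf c = none := by
  simp only [pvAllCodes, List.mem_cons, List.not_mem_nil, or_false, not_or] at hc
  obtain ⟨h1, h2, h3, h4, h5, h6, h7, h8, h9, h10, h11, h12, h13, h14, h15, h16, h17, h18, h19, h20⟩ := hc
  constructor
  · intro r hr
    simp only [pvRegionsA, List.mem_cons, List.not_mem_nil, or_false] at hr
    rcases hr with rfl | rfl | rfl | rfl | rfl <;>
      simp_all [List.contains_eq_mem]
  · simp [pvRegionOf, PySem.Dict.get?_mk_cons, PySem.Dict.get?,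
          Ne.symm h1, Ne.symm h2, Ne.symm h3, Ne.symm h4, Ne.symm h5, Ne.symm h6, Ne.symm h7,
          Ne.symm h8, Ne.symm h9, Ne.symm h10, Ne.symm h11, Ne.symm h12, Ne.symm h13, Ne.symm h14,
          Ne.symm h15, Ne.symm h16, Ne.symm h17, Ne.symm h18, Ne.symm h19, Ne.symm h20]

theorem pv_main (c d : String) :
    validate_broker_location c d = validate_broker_location_alt c d := by
  unfold validate_broker_location validate_broker_location_alt
  by_cases hcd : c == d
  · simp [hcd]
  · simp only [hcd, Bool.false_eq_true, if_false]
    by_cases hc : c ∈ pvAllCodes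
    · by_cases hd : d ∈ pvAllCodes
      · fin_cases hc <;> fin_cases hd <;> decide
      · obtain ⟨hrd, hgd⟩ := pv_unknown d hd
        rw [hgd]
        have hL : pvLoopA pvRegionsA c d = false := by
          simp only [pvRegionsA, List.mem_cons, forall_eq_or_imp] at hrd
          simp only [pvRegionsA, pvLoopA, hrd.1, hrd.2.1, hrd.2.2.1, hrd.2.2.2.1,
            hrd.2.2.2.2.1, Bool.and_false, Bool.false_eq_true, if_false]
        rw [hL]
        cases PySem.Dict.get? pvRegionOf c <;> simp
    · obtain ⟨hrc, hgc⟩ := pv_unknown c hc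
      rw [hgc]
      simp only [pvRegionsA, List.mem_cons, forall_eq_or_imp] at hrc
      simp only [pvRegionsA, pvLoopA, hrc.1, hrc.2.1, hrc.2.2.1, hrc.2.2.2.1,
        hrc.2.2.2.2.1, Bool.false_and, Bool.false_eq_true, if_false]

-- ===== VERDICT (by name: the statement is the Claim_ definition above) =====
theorem validate_broker_location_spec : Claim_equal_validate_broker_location := by
  intro c d _
  unfold Spec_validate_broker_location
  exact pv_main c d
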